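-- pv_equiv track=rewrite | github.com/michelleblom/stv-rla | audit_n_seats_general.py | vote_for_cand_ags1
-- ===== SOURCE A (Python) =====
-- def vote_for_cand_ags1(c, prefs, c_ag, candidates):
--     ags_used = 0
--
--     descs = set()
--
--     for p in prefs:
--         if p == c:
--             return True,ags_used,descs
--
--         if p != c:
--             if p in c_ag:
--                 ags_used = max(ags_used, c_ag[p])
--                 descs.add((c,"AG",p,c_ag[p]))
--             else:
--                 return False, None, set()
--
--     return False, None, set()
-- ===== SOURCE B (Python) =====
-- def vote_for_cand_ags1(c, prefs, c_ag, candidates):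
--     # Collect the prefix of prefs strictly before the first occurrence of c.
--     prefix = []
--     for p in prefs:
--         if p == c:
--             break
--         prefix.append(p)
--     else:
--         return False, None, set()
--
--     if not all(q in c_ag for q in prefix):
--         return False, None, set()
--
--     ags_used = max([0] + [c_ag[q] for q in prefix])
--     descs = {(c, "AG", q, c_ag[q]) for q in prefix}
--     return True, ags_used, descs
-- ===== Notes on version B (the rewrite author's own statement) =====
-- stated objective: simpler
-- what changed: Instead of accumulating max and the description set inside the scan with two early-exit branches, B first extracts the prefix of prefs before the first occurrence of c, then decides eligibility with a single all() membership check and computes ags_used and descs as separate comprehension passes over that prefix.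
import Mathlib
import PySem

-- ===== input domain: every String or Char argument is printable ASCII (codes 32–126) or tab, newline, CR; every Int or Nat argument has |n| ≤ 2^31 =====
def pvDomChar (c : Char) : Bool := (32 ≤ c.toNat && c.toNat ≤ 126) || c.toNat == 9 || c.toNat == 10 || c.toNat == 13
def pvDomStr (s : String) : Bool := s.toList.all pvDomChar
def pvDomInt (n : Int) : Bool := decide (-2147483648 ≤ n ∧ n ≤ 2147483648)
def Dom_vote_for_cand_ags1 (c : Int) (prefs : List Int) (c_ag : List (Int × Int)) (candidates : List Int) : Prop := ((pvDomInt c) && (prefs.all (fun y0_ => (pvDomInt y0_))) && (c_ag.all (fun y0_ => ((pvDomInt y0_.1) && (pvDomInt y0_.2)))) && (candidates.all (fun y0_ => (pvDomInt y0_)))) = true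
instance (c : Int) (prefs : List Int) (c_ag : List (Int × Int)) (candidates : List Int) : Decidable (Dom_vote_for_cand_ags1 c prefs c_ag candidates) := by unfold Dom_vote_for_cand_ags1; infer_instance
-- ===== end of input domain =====

-- B replaces A's in-loop accumulation by a prefix-extraction pass followed by separate all()/max/set-comprehension passes (objective: simpler; same cost).


-- ===== PORT A =====
def voteLoopA (c : Int) (d : PySem.Dict Int Int) (prefs : List Int)
    (ags_used : Int) (descs : PySem.Set (Int × String × Int × Int)) :
    Bool × Option Int × (List (Int × String × Int × Int)) :=
  match prefs with
  | [] => (false, none, [])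
  | p :: rest =>
    if p == c then (true, some ags_used, descs)
    else
      match PySem.Dict.get? d p with
      | some v => voteLoopA c d rest (max ags_used v) (PySem.Set.add descs (c, "AG", p, v))
      | none => (false, none, [])

def vote_for_cand_ags1 (c : Int) (prefs : List Int) (c_ag : List (Int × Int)) (candidates : List Int) : Bool × Option Int × (List (Int × String × Int × Int)) :=
  voteLoopA c (PySem.Dict.ofList c_ag) prefs 0 PySem.Set.empty

-- ===== PORT B =====
-- the for/else loop of B: prefix before the first c, none if c never occurs
def prefixBeforeB (c : Int) : List Int → Option (List Int)
  | [] => none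
  | p :: rest => if p == c then some [] else (prefixBeforeB c rest).map (p :: ·)

def vote_for_cand_ags1_alt (c : Int) (prefs : List Int) (c_ag : List (Int × Int)) (candidates : List Int) : Bool × Option Int × (List (Int × String × Int × Int)) :=
  let d := PySem.Dict.ofList c_ag
  match prefixBeforeB c prefs with
  | none => (false, none, [])
  | some pre =>
    if pre.all (fun q => PySem.Dict.contains d q) then
      let ags_used := ((0 : Int) :: pre.map (fun q => PySem.Dict.getD d q 0)).foldl max 0
      let descs := PySem.Set.ofList (pre.map (fun q => (c, "AG", q, PySem.Dict.getD d q 0)))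
      (true, some ags_used, descs)
    else (false, none, [])

-- ===== PRECONDITION & SPEC =====
def Spec_vote_for_cand_ags1 (c : Int) (prefs : List Int) (c_ag : List (Int × Int)) (candidates : List Int) (out : Bool × Option Int × (List (Int × String × Int × Int))) : Prop := out = vote_for_cand_ags1_alt c prefs c_ag candidates
instance (c : Int) (prefs : List Int) (c_ag : List (Int × Int)) (candidates : List Int) (out : Bool × Option Int × (List (Int × String × Int × Int))) : Decidable (Spec_vote_for_cand_ags1 c prefs c_ag candidates out) := by unfold Spec_vote_for_cand_ags1; infer_instance

-- ===== CLAIM (what is proved, stated in full; the proofs are below) =====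
def Claim_equal_vote_for_cand_ags1 : Prop := ∀ (c : Int) (prefs : List Int) (c_ag : List (Int × Int)) (candidates : List Int), Dom_vote_for_cand_ags1 c prefs c_ag candidates → Spec_vote_for_cand_ags1 c prefs c_ag candidates (vote_for_cand_ags1 c prefs c_ag candidates)

-- ===== LEMMAS AND PROOFS =====

theorem loopA_eq (c : Int) (d : PySem.Dict Int Int) : ∀ (prefs : List Int) (ags : Int)
    (descs : PySem.Set (Int × String × Int × Int)),
    voteLoopA c d prefs ags descs =
      match prefixBeforeB c prefs with
      | none => (false, none, [])
      | some pre =>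
        if pre.all (fun q => PySem.Dict.contains d q) then
          (true,
           some (pre.foldl (fun a q => max a (PySem.Dict.getD d q 0)) ags),
           pre.foldl (fun s q => PySem.Set.add s (c, "AG", q, PySem.Dict.getD d q 0)) descs)
        else (false, none, [])
  | [], ags, descs => rfl
  | p :: rest, ags, descs => by
    by_cases hpc : p == c
    · simp [voteLoopA, prefixBeforeB, hpc]
    · cases hg : PySem.Dict.get? d p with
      | some v =>
        have hc : PySem.Dict.contains d p = true := by
          simp [PySem.Dict.contains_eq_isSome_get?, hg]
        have hd : PySem.Dict.getD d p 0 = v := by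
          simp [PySem.Dict.getD_eq_get?_getD, hg]
        simp only [voteLoopA, prefixBeforeB, hpc, hg,
          loopA_eq c d rest (max ags v) (PySem.Set.add descs (c, "AG", p, v))]
        cases prefixBeforeB c rest with
        | none => rfl
        | some pre => simp [List.all_cons, hc, hd]
      | none =>
        have hc : PySem.Dict.contains d p = false := by
          simp [PySem.Dict.contains_eq_isSome_get?, hg]
        simp only [voteLoopA, prefixBeforeB, hpc, hg]
        cases prefixBeforeB c rest with
        | none => rfl
        | some pre => simp [List.all_cons, hc]


-- ===== VERDICT (by name: the statement is the Claim_ definition above) =====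
theorem vote_for_cand_ags1_spec : Claim_equal_vote_for_cand_ags1 := by
  intro c prefs c_ag candidates _
  unfold Spec_vote_for_cand_ags1 vote_for_cand_ags1 vote_for_cand_ags1_alt
  rw [loopA_eq]
  cases prefixBeforeB c prefs with
  | none => rfl
  | some pre =>
    by_cases h : pre.all (fun q => PySem.Dict.contains (PySem.Dict.ofList c_ag) q)
    · simp only [h, if_true]
      have h1 : List.foldl (fun a q => max a (PySem.Dict.getD (PySem.Dict.ofList c_ag) q 0)) 0 pre
          = List.foldl max 0 ((0:Int) :: pre.map (fun q => PySem.Dict.getD (PySem.Dict.ofList c_ag) q 0)) := by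
        rw [List.foldl_cons, max_self, List.foldl_map]
      have h2 : List.foldl (fun s q => PySem.Set.add s (c, "AG", q, PySem.Dict.getD (PySem.Dict.ofList c_ag) q 0)) PySem.Set.empty pre
          = PySem.Set.ofList (pre.map (fun q => (c, "AG", q, PySem.Dict.getD (PySem.Dict.ofList c_ag) q 0))) := by
        rw [PySem.Set.ofList_eq_foldl, List.foldl_map]
        rfl
      rw [h1, h2]
    · simp [h]
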